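-- pv_equiv track=rewrite | github.com/code-happy-ws/py_learn | learn/arithmetic/旋转数组中位数.py | get_mid_num
-- ===== SOURCE A (Python) =====
-- def get_mid_num(arr):
--     length=len(arr)
--     for i in range(1,length):
--         if arr[i] >= arr[i-1]:
--             pass
--         else:
--             change_index=i
--             remain=length-change_index
--             if remain>=change_index:
--                 index=(remain-change_index)//2+change_index*2
--                 return arr[index]
--             else:
--                 index=(change_index-remain)//2
--                 return arr[index]
--     else:
--         index=length//2
--         return arr[index]
-- ===== SOURCE B (Python) =====
-- def first_desc(arr, lo, hi):
--     """First index k with lo < k <= hi and arr[k] < arr[k-1], else None,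
--     by divide and conquer on the index range."""
--     if hi <= lo:
--         return None
--     if hi - lo == 1:
--         return lo + 1 if arr[lo + 1] < arr[lo] else None
--     mid = (lo + hi) // 2
--     left = first_desc(arr, lo, mid)
--     return left if left is not None else first_desc(arr, mid, hi)
--
-- def get_mid_num(arr):
--     n = len(arr)
--     i = first_desc(arr, 0, n - 1)
--     if i is None:
--         i = 0
--     return (arr[i:] + arr[:i])[n // 2]
-- ===== Notes on version B (the rewrite author's own statement) =====
-- stated objective: alternative
-- what changed: B finds the first-descent index by a divide-and-conquer recursion over index ranges (first hit in the left half, else the right half) instead of A's left-to-right loop, and reads the median from the explicitly rotated list (arr[i:]+arr[:i])[n//2] instead of A's three-branch index arithmetic; Pre_ excludes only inputs where A raises IndexError.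
import Mathlib
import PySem

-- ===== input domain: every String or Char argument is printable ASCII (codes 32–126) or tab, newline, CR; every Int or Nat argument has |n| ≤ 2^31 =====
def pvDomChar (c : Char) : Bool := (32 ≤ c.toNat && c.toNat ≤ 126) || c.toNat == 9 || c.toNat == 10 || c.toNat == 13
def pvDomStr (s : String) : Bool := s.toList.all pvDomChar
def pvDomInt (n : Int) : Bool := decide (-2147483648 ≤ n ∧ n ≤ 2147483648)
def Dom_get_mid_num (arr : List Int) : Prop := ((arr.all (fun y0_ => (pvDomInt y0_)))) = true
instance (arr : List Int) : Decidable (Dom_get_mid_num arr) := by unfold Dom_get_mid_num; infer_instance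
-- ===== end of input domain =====

-- B locates the first descent by divide and conquer on index ranges and indexes the explicitly
-- rotated list, instead of A's left-to-right loop with three-branch index arithmetic
-- (objective: alternative decomposition, same O(n) cost).

-- ===== PORT A =====
-- the for-loop of A, starting at i = 1; early return on the first descent
def aLoop (arr : List Int) (i : Nat) : Int :=
  if i < arr.length then
    if arr.getD (i - 1) 0 ≤ arr.getD i 0 then        -- arr[i] >= arr[i-1]: pass
      aLoop arr (i + 1)
    else
      let change := i
      let remain := arr.length - change
      if change ≤ remain then                         -- remain >= change_index
        arr.getD ((remain - change) / 2 + change * 2) 0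
      else
        arr.getD ((change - remain) / 2) 0
  else
    arr.getD (arr.length / 2) 0                       -- for-else branch
termination_by arr.length - i

def get_mid_num (arr : List Int) : Int := aLoop arr 1

-- ===== PORT B =====
-- first_desc: first k with lo < k ≤ hi and arr[k] < arr[k-1], else none, by divide and conquer
def firstDesc (arr : List Int) (lo hi : Nat) : Option Nat :=
  if hi ≤ lo then none
  else if hi - lo = 1 then
    if arr.getD (lo + 1) 0 < arr.getD lo 0 then some (lo + 1) else none
  else
    match firstDesc arr lo ((lo + hi) / 2) with
    | some k => some k
    | none => firstDesc arr ((lo + hi) / 2) hi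
termination_by hi - lo
decreasing_by all_goals omega

-- (arr[i:] + arr[:i])[n // 2]; with 0 ≤ i ≤ len arr the slices are exactly drop/take
def get_mid_num_alt (arr : List Int) : Int :=
  ((arr.drop ((firstDesc arr 0 (arr.length - 1)).getD 0)) ++
   (arr.take ((firstDesc arr 0 (arr.length - 1)).getD 0))).getD (arr.length / 2) 0

-- ===== PRECONDITION & SPEC =====
-- Pre_ excludes exactly the inputs where Python A raises IndexError: the empty list (B raises
-- there too), and even-length lists whose first descent is exactly at index length/2 (there A
-- computes the out-of-range index length).
def Pre_get_mid_num (arr : List Int) : Prop :=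
  arr ≠ [] ∧
  ¬ (arr.length % 2 = 0 ∧
     (∀ j, j < arr.length / 2 → 1 ≤ j → arr.getD (j - 1) 0 ≤ arr.getD j 0) ∧
     arr.getD (arr.length / 2) 0 < arr.getD (arr.length / 2 - 1) 0)
instance (arr : List Int) : Decidable (Pre_get_mid_num arr) := by unfold Pre_get_mid_num; infer_instance

def pvWitness_get_mid_num : List Int := [3, 1, 2]

def Spec_get_mid_num (arr : List Int) (out : Int) : Prop := out = get_mid_num_alt arr
instance (arr : List Int) (out : Int) : Decidable (Spec_get_mid_num arr out) := by unfold Spec_get_mid_num; infer_instance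

-- ===== CLAIM (what is proved, stated in full; the proofs are below) =====
def Claim_equal_get_mid_num : Prop := ∀ (arr : List Int), Dom_get_mid_num arr → Pre_get_mid_num arr → Spec_get_mid_num arr (get_mid_num arr)

-- ===== LEMMAS AND PROOFS =====

-- linear reference scan: first k with lo < k ≤ hi and arr[k] < arr[k-1], scanned left to right
def lfind (arr : List Int) (lo hi : Nat) : Option Nat :=
  if lo < hi then
    if arr.getD (lo + 1) 0 < arr.getD lo 0 then some (lo + 1) else lfind arr (lo + 1) hi
  else none
termination_by hi - lo

-- A's loop as a plain linear scan returning the first-descent index (0 if none)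
def linScan (arr : List Int) (k : Nat) : Nat :=
  if k < arr.length then
    if arr.getD k 0 < arr.getD (k - 1) 0 then k else linScan arr (k + 1)
  else 0
termination_by arr.length - k

theorem lfind_unfold (arr : List Int) (lo hi : Nat) :
    lfind arr lo hi = if lo < hi then
      (if arr.getD (lo + 1) 0 < arr.getD lo 0 then some (lo + 1) else lfind arr (lo + 1) hi)
    else none := by
  rw [lfind]

-- splitting the linear scan at any mid point
theorem lfind_split (arr : List Int) (hi : Nat) :
    ∀ d lo mid, mid - lo ≤ d → lo ≤ mid → mid ≤ hi →
      lfind arr lo hi = (match lfind arr lo mid with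
        | some k => some k
        | none => lfind arr mid hi) := by
  intro d
  induction d with
  | zero =>
    intro lo mid hd hlm hmh
    have hml : lo = mid := by omega
    subst hml
    rw [lfind_unfold arr lo lo, if_neg (by omega : ¬ lo < lo)]
  | succ d ih =>
    intro lo mid hd hlm hmh
    by_cases hlo : lo < mid
    · rw [lfind_unfold arr lo hi, if_pos (by omega : lo < hi)]
      rw [lfind_unfold arr lo mid, if_pos hlo]
      by_cases hc : arr.getD (lo + 1) 0 < arr.getD lo 0
      · rw [if_pos hc, if_pos hc]
      · rw [if_neg hc, if_neg hc]
        exact ih (lo + 1) mid (by omega) (by omega) hmh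
    · have hml : lo = mid := by omega
      subst hml
      rw [lfind_unfold arr lo lo, if_neg (by omega : ¬ lo < lo)]

-- the divide-and-conquer search equals the linear scan
theorem firstDesc_eq_lfind (arr : List Int) :
    ∀ d lo hi, hi - lo ≤ d → firstDesc arr lo hi = lfind arr lo hi := by
  intro d
  induction d with
  | zero =>
    intro lo hi hd
    rw [firstDesc, if_pos (by omega : hi ≤ lo), lfind_unfold arr lo hi,
        if_neg (by omega : ¬ lo < hi)]
  | succ d ih =>
    intro lo hi hd
    by_cases h0 : hi ≤ lo
    · rw [firstDesc, if_pos h0, lfind_unfold arr lo hi, if_neg (by omega : ¬ lo < hi)]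
    · rw [firstDesc, if_neg h0]
      by_cases h1 : hi - lo = 1
      · rw [if_pos h1, lfind_unfold arr lo hi, if_pos (by omega : lo < hi)]
        by_cases hc : arr.getD (lo + 1) 0 < arr.getD lo 0
        · rw [if_pos hc, if_pos hc]
        · rw [if_neg hc, if_neg hc, lfind_unfold arr (lo + 1) hi,
              if_neg (by omega : ¬ lo + 1 < hi)]
      · rw [if_neg h1]
        rw [ih lo ((lo + hi) / 2) (by omega), ih ((lo + hi) / 2) hi (by omega)]
        exact (lfind_split arr hi ((lo + hi) / 2 - lo) lo ((lo + hi) / 2)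
          (le_refl _) (by omega) (by omega)).symm

-- the linear scan from k equals lfind from k-1 up to length-1, defaulted to 0
theorem linScan_eq_lfind (arr : List Int) :
    ∀ d lo, arr.length - lo ≤ d →
      linScan arr (lo + 1) = (lfind arr lo (arr.length - 1)).getD 0 := by
  intro d
  induction d with
  | zero =>
    intro lo hd
    rw [linScan, if_neg (by omega : ¬ lo + 1 < arr.length),
        lfind_unfold arr lo (arr.length - 1), if_neg (by omega : ¬ lo < arr.length - 1)]
    rfl
  | succ d ih =>
    intro lo hd
    by_cases hlt : lo + 1 < arr.length
    · rw [linScan, if_pos hlt, lfind_unfold arr lo (arr.length - 1),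
          if_pos (by omega : lo < arr.length - 1)]
      have he : lo + 1 - 1 = lo := by omega
      rw [he]
      by_cases hc : arr.getD (lo + 1) 0 < arr.getD lo 0
      · rw [if_pos hc, if_pos hc]; rfl
      · rw [if_neg hc, if_neg hc]
        exact ih (lo + 1) (by omega)
    · rw [linScan, if_neg hlt, lfind_unfold arr lo (arr.length - 1),
          if_neg (by omega : ¬ lo < arr.length - 1)]
      rfl

-- the linear scan's result is always an index below the length (length ≥ 1)
theorem linScan_lt (arr : List Int) (hn : 1 ≤ arr.length) :
    ∀ d k, arr.length - k ≤ d → linScan arr k < arr.length := by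
  intro d
  induction d with
  | zero =>
    intro k hd
    rw [linScan, if_neg (by omega : ¬ k < arr.length)]
    omega
  | succ d ih =>
    intro k hd
    by_cases hk : k < arr.length
    · rw [linScan, if_pos hk]
      by_cases hc : arr.getD k 0 < arr.getD (k - 1) 0
      · rw [if_pos hc]; exact hk
      · rw [if_neg hc]; exact ih (k + 1) (by omega)
    · rw [linScan, if_neg hk]; omega

-- indexing the rotated list is modular indexing of the original
theorem rot_getD (arr : List Int) (i : Nat) (hi : i < arr.length) :
    ((arr.drop i) ++ (arr.take i)).getD (arr.length / 2) 0
      = arr.getD ((i + arr.length / 2) % arr.length) 0 := by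
  by_cases hc : arr.length / 2 < arr.length - i
  · rw [List.getD_append _ _ _ _ (by simpa [List.length_drop] using hc)]
    have hm : (i + arr.length / 2) % arr.length = i + arr.length / 2 :=
      Nat.mod_eq_of_lt (by omega)
    rw [hm]
    simp [List.getD_eq_getElem?_getD, List.getElem?_drop]
  · rw [List.getD_append_right _ _ _ _ (by simp [List.length_drop]; omega)]
    have hm : (i + arr.length / 2) % arr.length = i + arr.length / 2 - arr.length := by
      rw [Nat.mod_eq_sub_mod (by omega), Nat.mod_eq_of_lt (by omega)]
    rw [hm]
    have he : arr.length / 2 - (arr.drop i).length = i + arr.length / 2 - arr.length := by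
      simp [List.length_drop]; omega
    rw [he]
    simp [List.getD_eq_getElem?_getD, List.getElem?_take_of_lt (by omega : i + arr.length / 2 - arr.length < i)]

-- A's loop returns the modular median index of the first descent found by the linear scan
theorem loop_eq (arr : List Int) (hpre : Pre_get_mid_num arr) :
    ∀ d i, arr.length - i = d → 1 ≤ i →
    (∀ j, 1 ≤ j → j < i → arr.getD (j - 1) 0 ≤ arr.getD j 0) →
    aLoop arr i = arr.getD ((linScan arr i + arr.length / 2) % arr.length) 0 := by
  obtain ⟨hne, hodd⟩ := hpre
  have hn : 1 ≤ arr.length := List.length_pos_of_ne_nil hne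
  intro d
  induction d with
  | zero =>
    intro i hd h1 _
    have hge : ¬ i < arr.length := by omega
    rw [aLoop, linScan, if_neg hge, if_neg hge]
    have : arr.length / 2 % arr.length = arr.length / 2 :=
      Nat.mod_eq_of_lt (by omega)
    simp [this]
  | succ d ih =>
    intro i hd h1 hinv
    by_cases hlt : i < arr.length
    · rw [aLoop, linScan, if_pos hlt, if_pos hlt]
      by_cases hle : arr.getD (i - 1) 0 ≤ arr.getD i 0
      · rw [if_pos hle, if_neg (not_lt.mpr hle)]
        exact ih (i + 1) (by omega) (by omega)
          (fun j hj1 hj2 => by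
            by_cases hji : j < i
            · exact hinv j hj1 hji
            · have : j = i := by omega
              subst this; exact hle)
      · rw [if_neg hle, if_pos (lt_of_not_ge hle)]
        -- first descent is at i; Pre_ rules out arr.length = 2 * i
        have hne2i : arr.length ≠ 2 * i := by
          intro h2i
          exact hodd ⟨by omega, fun j hj2 hj1 => hinv j hj1 (by omega),
            by rw [show arr.length / 2 = i by omega] at *; omega⟩
        by_cases hc : i ≤ arr.length - i
        · rw [if_pos hc]
          have hidx : (i + arr.length / 2) % arr.length = i + arr.length / 2 :=
            Nat.mod_eq_of_lt (by omega)
          rw [hidx]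
          congr 1
          omega
        · rw [if_neg hc]
          have hidx : (i + arr.length / 2) % arr.length = i + arr.length / 2 - arr.length := by
            rw [Nat.mod_eq_sub_mod (by omega), Nat.mod_eq_of_lt (by omega)]
          rw [hidx]
          congr 1
          omega
    · omega

-- ===== VERDICT (by name: the statement is the Claim_ definition above) =====
theorem get_mid_num_spec : Claim_equal_get_mid_num := by
  intro arr _ hpre
  have hn : 1 ≤ arr.length := List.length_pos_of_ne_nil hpre.1
  unfold Spec_get_mid_num get_mid_num get_mid_num_alt
  rw [firstDesc_eq_lfind arr (arr.length - 1 - 0) 0 (arr.length - 1) (le_refl _),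
      ← linScan_eq_lfind arr (arr.length - 0) 0 (le_refl _)]
  rw [rot_getD arr (linScan arr 1)
      (linScan_lt arr hn (arr.length - 1) 1 (by omega))]
  exact loop_eq arr hpre (arr.length - 1) 1 rfl le_rfl (fun j hj1 hj2 => by omega)
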